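-- pv_equiv track=rewrite | github.com/bdamason/cursor-context | scripts/process_arr_waterfall.py | calculate_period_names
-- ===== SOURCE A (Python) =====
-- def calculate_period_names(start_year, start_month, count):
--     """
--     Generate a list of period names in YYYY_MM format.
--     Given a starting year/month, generate 'count' consecutive months.
--     """
--     periods = []
--     for i in range(count):
--         total_months = start_year * 12 + start_month - 1 + i
--         year = total_months // 12
--         month = (total_months % 12) + 1
--         periods.append(f"{year}_{month:02d}")
--     return periods
-- ===== SOURCE B (Python) =====
-- def calculate_period_names(start_year, start_month, count):
--     """
--     Generate a list of period names in YYYY_MM format.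
--     Given a starting year/month, generate 'count' consecutive months.
--     """
--     base = start_year * 12 + start_month - 1
--     year, month = base // 12, base % 12 + 1
--     periods = []
--     for _ in range(count):
--         periods.append(f"{year}_{month:02d}")
--         month += 1
--         if month > 12:
--             month = 1
--             year += 1
--     return periods
-- ===== Notes on version B (the rewrite author's own statement) =====
-- stated objective: alternative
-- what changed: B normalises the start with one floor divmod and then maintains a running (year, month) pair with rollover, instead of recomputing year and month by division and modulo from the loop index on every iteration.
import Mathlib
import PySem

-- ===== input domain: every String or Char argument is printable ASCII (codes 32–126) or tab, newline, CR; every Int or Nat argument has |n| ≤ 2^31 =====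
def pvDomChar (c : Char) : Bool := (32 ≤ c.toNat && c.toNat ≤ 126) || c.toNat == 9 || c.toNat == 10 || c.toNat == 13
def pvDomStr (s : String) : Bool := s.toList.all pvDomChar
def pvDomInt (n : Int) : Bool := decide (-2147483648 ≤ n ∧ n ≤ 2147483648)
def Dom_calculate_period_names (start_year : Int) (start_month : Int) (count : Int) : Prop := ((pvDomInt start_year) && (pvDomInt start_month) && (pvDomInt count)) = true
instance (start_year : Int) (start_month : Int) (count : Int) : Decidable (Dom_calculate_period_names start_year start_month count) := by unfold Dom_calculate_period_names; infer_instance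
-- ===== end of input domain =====

-- B replaces A's per-iteration division/modulo with a single initial divmod and an
-- incrementing (year, month) pair with month rollover (objective: alternative).

-- ===== PORT A =====
-- f"{year}_{month:02d}": hand-ported; exact here since month always lies in 1..12 (1 or 2 digits, zero-padded to 2)
def pvFmt (year : Int) (month : Int) : String :=
  PySem.Int.toStr year ++ "_" ++ (if month < 10 then "0" ++ PySem.Int.toStr month else PySem.Int.toStr month)

def calculate_period_names (start_year : Int) (start_month : Int) (count : Int) : List String :=
  (PySem.List.pyRange 0 count 1).foldl
    (fun periods i =>
      let total_months := start_year * 12 + start_month - 1 + i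
      let year := PySem.Int.floordiv total_months 12
      let month := PySem.Int.mod total_months 12 + 1
      periods ++ [pvFmt year month]) []

-- ===== PORT B =====
def pvAltLoop : Nat → Int → Int → List String → List String
  | 0, _, _, periods => periods
  | n + 1, year, month, periods =>
      let periods := periods ++ [pvFmt year month]
      if month + 1 > 12 then pvAltLoop n (year + 1) 1 periods
      else pvAltLoop n year (month + 1) periods

def calculate_period_names_alt (start_year : Int) (start_month : Int) (count : Int) : List String :=
  let base := start_year * 12 + start_month - 1
  pvAltLoop count.toNat (PySem.Int.floordiv base 12) (PySem.Int.mod base 12 + 1) []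

-- ===== PRECONDITION & SPEC =====
def Spec_calculate_period_names (start_year : Int) (start_month : Int) (count : Int) (out : List String) : Prop := out = calculate_period_names_alt start_year start_month count
instance (start_year : Int) (start_month : Int) (count : Int) (out : List String) : Decidable (Spec_calculate_period_names start_year start_month count out) := by unfold Spec_calculate_period_names; infer_instance

-- ===== CLAIM (what is proved, stated in full; the proofs are below) =====
def Claim_equal_calculate_period_names : Prop := ∀ (start_year : Int) (start_month : Int) (count : Int), Dom_calculate_period_names start_year start_month count → Spec_calculate_period_names start_year start_month count (calculate_period_names start_year start_month count)

-- ===== LEMMAS AND PROOFS =====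

-- one period name as a function of the absolute month number t
def pvG (t : Int) : String := pvFmt (PySem.Int.floordiv t 12) (PySem.Int.mod t 12 + 1)

-- rolling over the month is the same as stepping the absolute month number
lemma pvStep_carry (t : Int) (h : PySem.Int.mod t 12 + 1 + 1 > 12) :
    PySem.Int.floordiv (t + 1) 12 = PySem.Int.floordiv t 12 + 1 ∧
    PySem.Int.mod (t + 1) 12 + 1 = 1 := by
  have h1 := PySem.Int.floordiv_mul_add_mod t 12
  have h2 := PySem.Int.floordiv_mul_add_mod (t + 1) 12
  have hm1 := PySem.Int.mod_nonneg t (b := 12) (by norm_num)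
  have hm1' := PySem.Int.mod_lt t (b := 12) (by norm_num)
  have hm2 := PySem.Int.mod_nonneg (t + 1) (b := 12) (by norm_num)
  have hm2' := PySem.Int.mod_lt (t + 1) (b := 12) (by norm_num)
  omega

lemma pvStep_no_carry (t : Int) (h : ¬ PySem.Int.mod t 12 + 1 + 1 > 12) :
    PySem.Int.floordiv (t + 1) 12 = PySem.Int.floordiv t 12 ∧
    PySem.Int.mod (t + 1) 12 + 1 = PySem.Int.mod t 12 + 1 + 1 := by
  have h1 := PySem.Int.floordiv_mul_add_mod t 12
  have h2 := PySem.Int.floordiv_mul_add_mod (t + 1) 12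
  have hm1 := PySem.Int.mod_nonneg t (b := 12) (by norm_num)
  have hm1' := PySem.Int.mod_lt t (b := 12) (by norm_num)
  have hm2 := PySem.Int.mod_nonneg (t + 1) (b := 12) (by norm_num)
  have hm2' := PySem.Int.mod_lt (t + 1) (b := 12) (by norm_num)
  omega

-- peeling the first period off a block of n + 1 consecutive period names
lemma pvG_range_succ (t : Int) (n : Nat) :
    pvG t :: (List.range n).map (fun k : Nat => pvG (t + 1 + (k:Int))) =
      (List.range (n + 1)).map (fun k : Nat => pvG (t + (k:Int))) := by
  rw [List.range_succ_eq_map, List.map_cons, List.map_map]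
  congr 1
  · norm_num
  · apply List.map_congr_left
    intro k _
    simp only [Function.comp_apply]
    congr 1
    push_cast
    ring

lemma pvAltLoop_spec (n : Nat) : ∀ (t : Int) (acc : List String),
    pvAltLoop n (PySem.Int.floordiv t 12) (PySem.Int.mod t 12 + 1) acc
      = acc ++ (List.range n).map (fun k : Nat => pvG (t + (k:Int))) := by
  induction n with
  | zero => intro t acc; simp [pvAltLoop]
  | succ n ih =>
    intro t acc
    show (if PySem.Int.mod t 12 + 1 + 1 > 12 then _ else _) = _
    have key := ih (t + 1) (acc ++ [pvFmt (PySem.Int.floordiv t 12) (PySem.Int.mod t 12 + 1)])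
    rw [← pvG_range_succ t n]
    by_cases h : PySem.Int.mod t 12 + 1 + 1 > 12
    · obtain ⟨hy, hm⟩ := pvStep_carry t h
      rw [hy, hm] at key
      rw [if_pos h, key]
      simp [pvG]
    · obtain ⟨hy, hm⟩ := pvStep_no_carry t h
      rw [hy, hm] at key
      rw [if_neg h, key]
      simp [pvG]

lemma pvA_spec (start_year start_month count : Int) :
    calculate_period_names start_year start_month count
      = (List.range count.toNat).map (fun k : Nat => pvG (start_year * 12 + start_month - 1 + (k:Int))) := by
  unfold calculate_period_names
  rw [PySem.List.pyRange_one, List.foldl_map, PySem.List.foldl_append_singleton_eq_map]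
  simp only [Int.sub_zero, Int.zero_add, List.nil_append]
  apply List.map_congr_left
  intro k _
  simp only [pvG]

-- ===== VERDICT (by name: the statement is the Claim_ definition above) =====
theorem calculate_period_names_spec : Claim_equal_calculate_period_names := by
  intro start_year start_month count _
  unfold Spec_calculate_period_names calculate_period_names_alt
  rw [pvA_spec, pvAltLoop_spec count.toNat (start_year * 12 + start_month - 1) []]
  simp
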